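-- pv_equiv track=rewrite | github.com/PesseJinkman/unittest-rl | data/eval/L1/sum_of_digit_characters/buggy/bug_03.py | sum_of_digit_characters
-- ===== SOURCE A (Python) =====
-- def sum_of_digit_characters(text):
--     total = 0
--     seen_digit = False
--     for ch in text:
--         if '0' <= ch <= '9':
--             total += ord(ch) - ord('0')
--             seen_digit = True
--         elif seen_digit:
--             break
--     return total
-- ===== SOURCE B (Python) =====
-- def sum_of_digit_characters(text):
--     def digit(c):
--         return '0' <= c <= '9'
--     n = len(text)
--     i = 0
--     while i < n and not digit(text[i]):
--         i += 1
--     j = i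
--     while j < n and digit(text[j]):
--         j += 1
--     return sum(ord(c) - 48 for c in text[i:j])
-- ===== Notes on version B (the rewrite author's own statement) =====
-- stated objective: simpler
-- what changed: Replaces the stateful seen_digit flag + break loop with a phase-separated scan: skip leading non-digits, find the end of the digit run, then sum the digit values of that slice.
import Mathlib
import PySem

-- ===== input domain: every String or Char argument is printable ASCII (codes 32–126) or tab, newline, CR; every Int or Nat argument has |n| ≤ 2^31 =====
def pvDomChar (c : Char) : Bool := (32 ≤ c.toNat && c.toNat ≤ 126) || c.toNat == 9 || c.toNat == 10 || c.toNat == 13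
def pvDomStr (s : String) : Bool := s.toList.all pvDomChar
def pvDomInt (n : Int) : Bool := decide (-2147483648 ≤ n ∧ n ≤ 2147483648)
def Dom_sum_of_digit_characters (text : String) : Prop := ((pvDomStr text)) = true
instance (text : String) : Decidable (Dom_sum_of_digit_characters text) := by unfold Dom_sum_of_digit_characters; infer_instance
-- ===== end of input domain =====

-- B replaces A's seen_digit flag + break loop by a phase-separated scan (skip non-digits,
-- take the digit run, sum its values); simpler decomposition, same O(n) cost.

-- the test '0' <= ch <= '9', shared by both sources
def sodcDigit (c : Char) : Bool := decide ('0' ≤ c) && decide (c ≤ '9')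

-- ===== PORT A =====
-- A's for-loop with the early 'break': structural recursion over the characters,
-- carrying (total, seen_digit) exactly as A does.
def sodcLoopA : List Char → Int → Bool → Int
  | [], total, _ => total
  | ch :: rest, total, seen =>
    if sodcDigit ch then
      sodcLoopA rest (total + ((ch.toNat : Int) - ('0'.toNat : Int))) true
    else if seen then total
    else sodcLoopA rest total seen

def sum_of_digit_characters (text : String) : Int :=
  sodcLoopA text.toList 0 false

-- ===== PORT B =====
-- Source B's first while loop: advance past leading non-digit characters.
def sodcDropNon : List Char → List Char
  | [] => []
  | c :: rest => if sodcDigit c then c :: rest else sodcDropNon rest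

-- Source B's second while loop: the contiguous digit run text[i:j].
def sodcTakeDig : List Char → List Char
  | [] => []
  | c :: rest => if sodcDigit c then c :: sodcTakeDig rest else []

def sum_of_digit_characters_alt (text : String) : Int :=
  ((sodcTakeDig (sodcDropNon text.toList)).map (fun c => (c.toNat : Int) - 48)).sum

-- ===== PRECONDITION & SPEC =====
def Spec_sum_of_digit_characters (text : String) (out : Int) : Prop := out = sum_of_digit_characters_alt text
instance (text : String) (out : Int) : Decidable (Spec_sum_of_digit_characters text out) := by unfold Spec_sum_of_digit_characters; infer_instance

-- ===== CLAIM (what is proved, stated in full; the proofs are below) =====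
def Claim_equal_sum_of_digit_characters : Prop := ∀ (text : String), Dom_sum_of_digit_characters text → Spec_sum_of_digit_characters text (sum_of_digit_characters text)

-- ===== LEMMAS AND PROOFS =====
theorem sodcZeroCast : (('0'.toNat : Int)) = 48 := rfl

-- Once a digit has been seen, A's loop sums exactly the remaining digit run.
theorem sodcLoopA_true : ∀ (cs : List Char) (t : Int),
    sodcLoopA cs t true = t + ((sodcTakeDig cs).map (fun c => (c.toNat : Int) - 48)).sum
  | [], t => by simp [sodcLoopA, sodcTakeDig]
  | c :: rest, t => by
    simp only [sodcLoopA, sodcTakeDig]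
    by_cases h : sodcDigit c = true
    · rw [if_pos h, if_pos h, sodcLoopA_true rest, List.map_cons, List.sum_cons, sodcZeroCast]
      ring
    · rw [if_neg h, if_neg h, if_pos trivial]
      simp

-- Before any digit is seen, A's loop skips non-digits, matching B's first phase.
theorem sodcLoopA_false : ∀ (cs : List Char),
    sodcLoopA cs 0 false
      = ((sodcTakeDig (sodcDropNon cs)).map (fun c => (c.toNat : Int) - 48)).sum
  | [] => by simp [sodcLoopA, sodcDropNon, sodcTakeDig]
  | c :: rest => by
    simp only [sodcLoopA, sodcDropNon]
    by_cases h : sodcDigit c = true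
    · rw [if_pos h, if_pos h, sodcLoopA_true rest]
      simp only [sodcTakeDig]
      rw [if_pos h, List.map_cons, List.sum_cons, sodcZeroCast]
      ring
    · rw [if_neg h, if_neg h, if_neg Bool.false_ne_true]
      exact sodcLoopA_false rest

-- ===== VERDICT (by name: the statement is the Claim_ definition above) =====
theorem sum_of_digit_characters_spec : Claim_equal_sum_of_digit_characters := by
  intro text _
  unfold Spec_sum_of_digit_characters sum_of_digit_characters sum_of_digit_characters_alt
  exact sodcLoopA_false text.toList
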